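-- pv_equiv track=rewrite | github.com/coding-beagle/portfolio-website | python_scripts/scrape_conway.py | parse_cells_metadata
-- ===== SOURCE A (Python) =====
-- def parse_cells_metadata(text):
--     name = None
--     author = None
--     description_lines = []
--     lines = text.splitlines()
--     for idx, line in enumerate(lines):
--         if not line.startswith("!"):
--             break
--         content = line[1:].strip()
--         if not content:
--             continue
--         if idx == 0:
--             name = content
--             continue
--         if idx == 1:
--             author = content
--             continue
--         description_lines.append(content)
--     if description_lines and name in description_lines[0]:
--         description_lines = description_lines[1:]
--     description = " ".join(description_lines).strip()
--     return name, author, description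
-- ===== SOURCE B (Python) =====
-- def parse_cells_metadata(text):
--     def go(lines, idx):
--         # recursion on the header structure; description built back-to-front
--         if not lines or not lines[0].startswith("!"):
--             return (None, None, [])
--         content = lines[0][1:].strip()
--         name, author, desc = go(lines[1:], idx + 1)
--         if not content:
--             return (name, author, desc)
--         if idx == 0:
--             return (content, author, desc)
--         if idx == 1:
--             return (name, content, desc)
--         return (name, author, [content] + desc)
--
--     name, author, dl = go(text.splitlines(), 0)
--     if dl and name is not None and name in dl[0]:
--         dl = dl[1:]
--     return name, author, " ".join(dl).strip()
-- ===== Notes on version B (the rewrite author's own statement) =====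
-- stated objective: alternative
-- what changed: Replaces A's forward iterative loop with mutable accumulators by structural recursion on the line list that builds the description back-to-front ([content] + desc on the way out of the recursion), assigning name/author as the recursion unwinds; B also guards the dedup membership test on name being present, so it returns where A raises TypeError.
-- crash fix: When the first header line is blank after its exclamation marker but later header lines carry description text, A raises TypeError ('in' with name = None); B returns the metadata with name set to None. — e.g. on parse_cells_metadata("!\n!a\n!b"): A raises TypeError, B returns (none, some "a", "b")
import Mathlib
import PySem

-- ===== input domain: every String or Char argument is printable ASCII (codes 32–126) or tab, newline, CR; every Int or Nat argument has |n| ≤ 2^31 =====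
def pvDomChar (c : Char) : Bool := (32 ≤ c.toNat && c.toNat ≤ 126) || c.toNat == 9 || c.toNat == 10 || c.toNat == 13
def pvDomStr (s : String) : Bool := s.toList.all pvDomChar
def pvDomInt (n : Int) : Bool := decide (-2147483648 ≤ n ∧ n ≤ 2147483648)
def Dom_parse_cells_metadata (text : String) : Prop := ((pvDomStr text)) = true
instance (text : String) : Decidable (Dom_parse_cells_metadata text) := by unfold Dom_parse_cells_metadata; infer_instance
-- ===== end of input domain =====

-- B replaces A's forward loop with accumulators by structural recursion on the line list,
-- building the description back-to-front as the recursion unwinds (alternative decomposition, same cost).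

-- ===== PORT A =====
-- the for-loop with break, carrying (name, author, description_lines) and the index
def pvA_go : List String → Nat → Option String → Option String → List String →
    Option String × Option String × List String
  | [], _, name, author, desc => (name, author, desc)
  | line :: rest, idx, name, author, desc =>
    if PySem.Str.startswith line "!" = false then (name, author, desc)
    else
      let content := PySem.Str.strip (PySem.Str.slice line (some 1) none)
      if content = "" then pvA_go rest (idx+1) name author desc
      else if idx = 0 then pvA_go rest (idx+1) (some content) author desc
      else if idx = 1 then pvA_go rest (idx+1) name (some content) desc
      else pvA_go rest (idx+1) name author (desc ++ [content])

def parse_cells_metadata (text : String) : Option String × Option String × String :=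
  let lines := PySem.Str.splitlines text
  let r := pvA_go lines 0 none none []
  let name := r.1
  let author := r.2.1
  let dl := r.2.2
  -- `if description_lines and name in description_lines[0]`: when name is None and dl ≠ []
  -- Python raises TypeError (excluded by Pre_); the port leaves dl unchanged there
  let dl2 := match dl, name with
    | d0 :: rest, some n => if PySem.Str.isIn n d0 then rest else d0 :: rest
    | _, _ => dl
  (name, author, PySem.Str.strip (PySem.Str.join " " dl2))

-- ===== PORT B =====
-- Source B's recursive helper `go`: recursion on the line list, description built back-to-front
def pvB_go : List String → Nat → Option String × Option String × List String
  | [], _ => (none, none, [])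
  | line :: rest, idx =>
    if PySem.Str.startswith line "!" = false then (none, none, [])
    else
      let content := PySem.Str.strip (PySem.Str.slice line (some 1) none)
      let r := pvB_go rest (idx+1)
      if content = "" then r
      else if idx = 0 then (some content, r.2.1, r.2.2)
      else if idx = 1 then (r.1, some content, r.2.2)
      else (r.1, r.2.1, content :: r.2.2)

def parse_cells_metadata_alt (text : String) : Option String × Option String × String :=
  let r := pvB_go (PySem.Str.splitlines text) 0
  let name := r.1
  let author := r.2.1
  let dl := r.2.2
  -- `if dl and name is not None and name in dl[0]: dl = dl[1:]`
  let dl2 := match dl with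
    | [] => ([] : List String)
    | d0 :: rest =>
      match name with
      | some n => if PySem.Str.isIn n d0 then rest else d0 :: rest
      | none => d0 :: rest
  (name, author, PySem.Str.strip (PySem.Str.join " " dl2))

-- ===== PRECONDITION & SPEC =====
-- Pre_ excludes exactly the inputs on which Python A raises TypeError (the dedup membership test
-- with name = None): first header line blank after its marker while a later header line carries description text.
def Pre_parse_cells_metadata (text : String) : Prop :=
  let s := ((PySem.Str.splitlines text).takeWhile (fun l => PySem.Str.startswith l "!")).map
      (fun l => PySem.Str.strip (PySem.Str.slice l (some 1) none))
  ¬ (s.head? = some "" ∧ (s.drop 2).any (fun c => c ≠ "") = true)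
instance (text : String) : Decidable (Pre_parse_cells_metadata text) := by
  unfold Pre_parse_cells_metadata; infer_instance

def pvWitness_parse_cells_metadata : String := "!name\n!auth\n!d1\n!d2\nx"

-- A raises TypeError when the name slot is blank but description header lines exist; B returns
-- the metadata with name = None there.
def Raises_parse_cells_metadata (text : String) : Prop :=
  let s := ((PySem.Str.splitlines text).takeWhile (fun l => PySem.Str.startswith l "!")).map
      (fun l => PySem.Str.strip (PySem.Str.slice l (some 1) none))
  s.head? = some "" ∧ (s.drop 2).any (fun c => c ≠ "") = true
instance (text : String) : Decidable (Raises_parse_cells_metadata text) := by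
  unfold Raises_parse_cells_metadata; infer_instance

def pvRaiseWitness_parse_cells_metadata : String := "!\n!a\n!b"
def pvRaiseWitnessOut_parse_cells_metadata : Option String × Option String × String :=
  (none, some "a", "b")

def Spec_parse_cells_metadata (text : String) (out : Option String × Option String × String) : Prop :=
  out = parse_cells_metadata_alt text
instance (text : String) (out : Option String × Option String × String) :
    Decidable (Spec_parse_cells_metadata text out) := by unfold Spec_parse_cells_metadata; infer_instance

-- ===== CLAIM (what is proved, stated in full; the proofs are below) =====
def Claim_equal_parse_cells_metadata : Prop := ∀ (text : String), Dom_parse_cells_metadata text →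
  Pre_parse_cells_metadata text → Spec_parse_cells_metadata text (parse_cells_metadata text)

def Claim_raises_parse_cells_metadata : Prop :=
  (∀ (text : String), Dom_parse_cells_metadata text → Raises_parse_cells_metadata text →
    ¬ Pre_parse_cells_metadata text) ∧
  (Dom_parse_cells_metadata (pvRaiseWitness_parse_cells_metadata) ∧
    Raises_parse_cells_metadata (pvRaiseWitness_parse_cells_metadata) ∧
    parse_cells_metadata_alt (pvRaiseWitness_parse_cells_metadata) = pvRaiseWitnessOut_parse_cells_metadata)

-- ===== LEMMAS AND PROOFS =====

-- at indices ≥ 2 the recursion never touches name/author, and A's accumulator equals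
-- B's back-to-front list appended to the accumulator
lemma pvGo_ge_two (ls : List String) (idx : Nat) (name author : Option String)
    (desc : List String) :
    pvA_go ls (idx + 2) name author desc = (name, author, desc ++ (pvB_go ls (idx + 2)).2.2) ∧
      (pvB_go ls (idx + 2)).1 = none ∧ (pvB_go ls (idx + 2)).2.1 = none := by
  induction ls generalizing idx desc with
  | nil => simp [pvA_go, pvB_go]
  | cons l rest ih =>
    simp only [pvA_go, pvB_go]
    cases h : PySem.Str.startswith l "!"
    · simp
    · simp only [Bool.true_eq_false, if_false]
      have h0 : ¬ (idx + 2 = 0) := by omega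
      have h1 : ¬ (idx + 2 = 1) := by omega
      have hstep : idx + 2 + 1 = (idx + 1) + 2 := by omega
      have ih' := ih (idx + 1)
      by_cases hc : PySem.Str.strip (PySem.Str.slice l (some 1) none) = ""
      · rw [if_pos hc, hstep]
        simpa [hc] using ih' desc
      · rw [if_neg hc, if_neg h0, if_neg h1, hstep]
        have := ih' (desc ++ [PySem.Str.strip (PySem.Str.slice l (some 1) none)])
        simp [hc, this.1, this.2.1, this.2.2]

-- at index 1: author is determined by the recursion's tail, name is never touched
lemma pvGo_one (ls : List String) (name : Option String) :
    pvA_go ls 1 name none [] = (name, (pvB_go ls 1).2.1, (pvB_go ls 1).2.2) ∧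
      (pvB_go ls 1).1 = none := by
  cases ls with
  | nil => simp [pvA_go, pvB_go]
  | cons l rest =>
    simp only [pvA_go, pvB_go]
    cases h : PySem.Str.startswith l "!"
    · simp
    · simp only [Bool.true_eq_false, if_false]
      have h2 := pvGo_ge_two rest 0 name none []
      have h2' := pvGo_ge_two rest 0 name
        (some (PySem.Str.strip (PySem.Str.slice l (some 1) none))) []
      rw [Nat.zero_add] at h2 h2'
      by_cases hc : PySem.Str.strip (PySem.Str.slice l (some 1) none) = ""
      · simp [hc, h2.1, h2.2.1, h2.2.2]
      · simp [hc, h2'.1, h2'.2.1]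

-- the two loop/recursion shapes compute the same triple from index 0
lemma pvGo_zero (ls : List String) : pvA_go ls 0 none none [] = pvB_go ls 0 := by
  cases ls with
  | nil => simp [pvA_go, pvB_go]
  | cons l rest =>
    simp only [pvA_go, pvB_go]
    cases h : PySem.Str.startswith l "!"
    · simp
    · simp only [Bool.true_eq_false, if_false]
      by_cases hc : PySem.Str.strip (PySem.Str.slice l (some 1) none) = ""
      · have h1 := pvGo_one rest none
        simp [hc, h1.1, h1.2, Prod.ext_iff]
      · have h1 := pvGo_one rest (some (PySem.Str.strip (PySem.Str.slice l (some 1) none)))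
        simp [hc, h1.1]

-- the two ports' dedup steps agree (A's two-scrutinee match vs B's nested match)
lemma pvDedup_eq (dl : List String) (name : Option String) :
    (match dl, name with
     | d0 :: rest, some n => if PySem.Str.isIn n d0 then rest else d0 :: rest
     | _, _ => dl) =
    (match dl with
     | [] => ([] : List String)
     | d0 :: rest =>
       match name with
       | some n => if PySem.Str.isIn n d0 then rest else d0 :: rest
       | none => d0 :: rest) := by
  cases dl <;> cases name <;> rfl

-- ===== VERDICT (by name: the statement is the Claim_ definition above) =====
theorem parse_cells_metadata_spec : Claim_equal_parse_cells_metadata := by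
  intro text _ _
  unfold Spec_parse_cells_metadata parse_cells_metadata parse_cells_metadata_alt
  simp only [pvGo_zero, pvDedup_eq]

theorem parse_cells_metadata_raises : Claim_raises_parse_cells_metadata := by
  unfold Claim_raises_parse_cells_metadata
  constructor
  · intro text _ hr
    unfold Pre_parse_cells_metadata
    unfold Raises_parse_cells_metadata at hr
    exact fun hp => hp hr
  · refine ⟨by decide, by decide, by decide⟩

-- self-check: the raise witness lies inside Raises_ and outside Pre_
theorem parse_cells_metadata_raises_witness_ok :
    Raises_parse_cells_metadata pvRaiseWitness_parse_cells_metadata ∧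
      ¬ Pre_parse_cells_metadata pvRaiseWitness_parse_cells_metadata :=
  ⟨parse_cells_metadata_raises.2.2.1,
   parse_cells_metadata_raises.1 pvRaiseWitness_parse_cells_metadata (by decide)
     parse_cells_metadata_raises.2.2.1⟩
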